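-- pv_equiv track=rewrite | github.com/ascendanti/The-Combine | daemon/skills/plugins/external/tapestry_adapter.py | _deduplicate_text
-- ===== SOURCE A (Python) =====
-- def _deduplicate_text(text: str) -> str:
--     """Remove repeated phrases from transcript."""
--     words = text.split()
--     result = []
--     prev_window = []
--     window_size = 5
--
--     for word in words:
--         current_window = prev_window + [word]
--         if len(current_window) > window_size:
--             current_window = current_window[-window_size:]
--
--         # Check for repetition
--         window_str = " ".join(current_window)
--         if len(result) >= window_size:
--             last_window = " ".join(result[-window_size:])
--             if window_str == last_window:
--                 continue
--
--         result.append(word)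
--         prev_window = current_window
--
--     return " ".join(result)
-- ===== SOURCE B (Python) =====
-- def _deduplicate_text(text: str) -> str:
--     """Remove repeated phrases from transcript."""
--     result = []
--     run = 0
--     for w in text.split():
--         run = run + 1 if result and w == result[-1] else 1
--         if run <= 5:
--             result.append(w)
--     return " ".join(result)
-- ===== Notes on version B (the rewrite author's own statement) =====
-- stated objective: simpler
-- what changed: A builds 5-word window lists and compares space-joined window strings against the joined tail of the result; B keeps only an integer run-length counter compared against the last appended word and appends a word while its run is at most 5.
import Mathlib
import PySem

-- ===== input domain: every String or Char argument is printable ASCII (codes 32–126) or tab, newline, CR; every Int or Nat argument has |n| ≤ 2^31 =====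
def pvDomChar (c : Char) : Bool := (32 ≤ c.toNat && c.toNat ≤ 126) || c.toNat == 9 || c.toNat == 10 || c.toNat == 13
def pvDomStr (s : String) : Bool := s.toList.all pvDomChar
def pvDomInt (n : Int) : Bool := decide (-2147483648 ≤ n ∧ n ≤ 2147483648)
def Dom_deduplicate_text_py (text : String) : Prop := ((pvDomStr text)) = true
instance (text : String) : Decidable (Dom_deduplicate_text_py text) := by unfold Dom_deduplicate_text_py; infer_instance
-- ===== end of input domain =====

-- B replaces A's window lists and join-and-compare strings by a single run-length
-- counter over the words, appending a word only while its run is at most 5 (simpler).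

-- ===== PORT A =====
-- loop body of A's `for word in words` (state = (result, prev_window))
def dedupAStep (st : List String × List String) (word : String) :
    List String × List String :=
  let current_window := st.2 ++ [word]
  let current_window :=
    if (5 : Int) < PySem.List.len current_window then
      PySem.List.slice current_window (some (-5)) none
    else current_window
  let window_str := PySem.Str.join " " current_window
  if (5 : Int) ≤ PySem.List.len st.1 ∧
      window_str = PySem.Str.join " " (PySem.List.slice st.1 (some (-5)) none) then
    st  -- continue
  else
    (st.1 ++ [word], current_window)

def deduplicate_text_py (text : String) : String :=
  let words := PySem.Str.split₀ text
  let st := words.foldl dedupAStep ([], [])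
  PySem.Str.join " " st.1

-- ===== PORT B =====
-- loop body of B's `for w in text.split()` (state = (result, run))
def dedupBStep (st : List String × Nat) (w : String) : List String × Nat :=
  let run := if st.1 ≠ [] ∧ PySem.List.pyGetD st.1 (-1) "" = w then st.2 + 1 else 1
  if run ≤ 5 then (st.1 ++ [w], run) else (st.1, run)

def deduplicate_text_py_alt (text : String) : String :=
  let st := (PySem.Str.split₀ text).foldl dedupBStep ([], 0)
  PySem.Str.join " " st.1

-- ===== PRECONDITION & SPEC =====
def Spec_deduplicate_text_py (text : String) (out : String) : Prop := out = deduplicate_text_py_alt text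
instance (text : String) (out : String) : Decidable (Spec_deduplicate_text_py text out) := by unfold Spec_deduplicate_text_py; infer_instance

-- ===== CLAIM (what is proved, stated in full; the proofs are below) =====
def Claim_equal_deduplicate_text_py : Prop := ∀ (text : String), Dom_deduplicate_text_py text → Spec_deduplicate_text_py text (deduplicate_text_py text)

-- ===== LEMMAS AND PROOFS =====

-- a genuine word: nonempty and whitespace-free (true of every word of `text.split()`)
def pvWord (w : String) : Prop :=
  w.toList ≠ [] ∧ ∀ c ∈ w.toList, PySem.Chars.isspace c = false

def pvInv (a : List String × List String) (b : List String × Nat) : Prop :=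
  b.1 = a.1 ∧
  a.2 = a.1.drop (a.1.length - 5) ∧
  (∀ x ∈ a.1, pvWord x) ∧
  ((a.1 = [] ∧ b.2 = 0) ∨
   (∃ x rest, a.1.reverse = x :: rest ∧ 1 ≤ b.2 ∧
      rest.take (min b.2 5 - 1) = List.replicate (min b.2 5 - 1) x ∧
      (min b.2 5 < 5 → rest[min b.2 5 - 1]? ≠ some x)))

theorem split₀_go_words (s cur : List Char) (acc : List (List Char))
    (hcur : ∀ c ∈ cur, PySem.Chars.isspace c = false)
    (hacc : ∀ w ∈ acc, w ≠ [] ∧ ∀ c ∈ w, PySem.Chars.isspace c = false) :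
    ∀ w ∈ PySem.Chars.split₀.go s cur acc,
      w ≠ [] ∧ ∀ c ∈ w, PySem.Chars.isspace c = false := by
  induction s generalizing cur acc with
  | nil =>
      intro w hw
      simp only [PySem.Chars.split₀.go] at hw
      split at hw
      · exact hacc w (List.mem_reverse.mp hw)
      · rcases List.mem_cons.mp (List.mem_reverse.mp hw) with h | h
        · subst h
          rename_i hne
          refine ⟨by simpa using fun h => hne (by simp [h]), ?_⟩
          intro c hc
          exact hcur c (List.mem_reverse.mp hc)
        · exact hacc w h
  | cons c rest ih =>
      intro w hw
      simp only [PySem.Chars.split₀.go] at hw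
      split at hw
      · split at hw
        · exact ih [] acc (by simp) hacc w hw
        · refine ih [] _ (by simp) ?_ w hw
          intro v hv
          rcases List.mem_cons.mp hv with h | h
          · subst h
            rename_i hne
            refine ⟨by simpa using fun h => hne (by simp [h]), ?_⟩
            intro d hd
            exact hcur d (List.mem_reverse.mp hd)
          · exact hacc v h
      · refine ih (c :: cur) acc ?_ hacc w hw
        intro d hd
        rcases List.mem_cons.mp hd with h | h
        · subst h
          rename_i hns
          simpa using hns
        · exact hcur d h

theorem split₀_words (text : String) :
    ∀ w ∈ PySem.Str.split₀ text, pvWord w := by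
  intro w hw
  have h : w.toList ∈ PySem.Chars.split₀ text.toList := by
    rw [← PySem.Str.split₀_map_toList]
    exact List.mem_map_of_mem hw
  exact split₀_go_words text.toList [] [] (by simp) (by simp) w.toList h

theorem sep_inj (a b x y : List Char) (ha : (' ' : Char) ∉ a) (hb : (' ' : Char) ∉ b)
    (h : a ++ ' ' :: x = b ++ ' ' :: y) : a = b ∧ x = y := by
  induction a generalizing b with
  | nil =>
      cases b with
      | nil => simpa using h
      | cons d b' =>
          exfalso
          simp only [List.nil_append, List.cons_append, List.cons.injEq] at h
          exact hb (h.1 ▸ List.mem_cons_self)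
  | cons c a' ih =>
      cases b with
      | nil =>
          exfalso
          simp only [List.cons_append, List.nil_append, List.cons.injEq] at h
          exact ha (h.1.symm ▸ List.mem_cons_self)
      | cons d b' =>
          simp only [List.cons_append, List.cons.injEq] at h
          obtain ⟨h1, h2⟩ := h
          obtain ⟨h3, h4⟩ := ih b' (fun hm => ha (List.mem_cons_of_mem _ hm))
            (fun hm => hb (List.mem_cons_of_mem _ hm)) h2
          exact ⟨by rw [h1, h3], h4⟩

theorem join_inj (l₁ l₂ : List (List Char)) (hlen : l₁.length = l₂.length)
    (h₁ : ∀ w ∈ l₁, w ≠ [] ∧ (' ' : Char) ∉ w) (h₂ : ∀ w ∈ l₂, w ≠ [] ∧ (' ' : Char) ∉ w)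
    (h : PySem.Chars.join [' '] l₁ = PySem.Chars.join [' '] l₂) : l₁ = l₂ := by
  induction l₁ generalizing l₂ with
  | nil => cases l₂ with
      | nil => rfl
      | cons b t => simp at hlen
  | cons a s ih =>
      cases l₂ with
      | nil => simp at hlen
      | cons b t =>
          cases s with
          | nil =>
              cases t with
              | nil =>
                  rw [PySem.Chars.join_singleton, PySem.Chars.join_singleton] at h
                  rw [h]
              | cons t1 t' => simp at hlen
          | cons s1 s' =>
              cases t with
              | nil => simp at hlen
              | cons t1 t' =>
                  rw [PySem.Chars.join_cons_cons, PySem.Chars.join_cons_cons] at h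
                  simp only [List.append_assoc, List.singleton_append] at h
                  obtain ⟨hab, hrest⟩ := sep_inj _ _ _ _ (h₁ a List.mem_cons_self).2
                    (h₂ b List.mem_cons_self).2 h
                  have := ih (t1 :: t') (by simpa using hlen)
                    (fun w hw => h₁ w (List.mem_cons_of_mem _ hw))
                    (fun w hw => h₂ w (List.mem_cons_of_mem _ hw)) hrest
                  rw [hab, this]

theorem str_join_inj (l₁ l₂ : List String) (hlen : l₁.length = l₂.length)
    (h₁ : ∀ w ∈ l₁, pvWord w) (h₂ : ∀ w ∈ l₂, pvWord w)
    (h : PySem.Str.join " " l₁ = PySem.Str.join " " l₂) : l₁ = l₂ := by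
  have hL : PySem.Chars.join [' '] (l₁.map String.toList)
      = PySem.Chars.join [' '] (l₂.map String.toList) := by
    have := congrArg String.toList h
    simpa [PySem.Str.toList_join] using this
  have hmap := join_inj (l₁.map String.toList) (l₂.map String.toList)
    (by simpa using hlen)
    (by
      intro w hw
      obtain ⟨v, hv, rfl⟩ := List.mem_map.mp hw
      refine ⟨(h₁ v hv).1, fun hsp => ?_⟩
      have := (h₁ v hv).2 ' ' hsp
      simp [PySem.Chars.isspace] at this)
    (by
      intro w hw
      obtain ⟨v, hv, rfl⟩ := List.mem_map.mp hw
      refine ⟨(h₂ v hv).1, fun hsp => ?_⟩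
      have := (h₂ v hv).2 ' ' hsp
      simp [PySem.Chars.isspace] at this)
    hL
  exact List.map_injective_iff.mpr (fun s t hst => String.toList_inj.mp hst) hmap

theorem pv_snoc_eq_cons (l : List String) (y x : String) (h : l ++ [x] = y :: l) :
    ∀ z ∈ y :: l, z = x := by
  induction l generalizing y with
  | nil => simp_all
  | cons a l' ih =>
      simp only [List.cons_append, List.cons.injEq] at h
      obtain ⟨h1, h2⟩ := h
      have hall := ih a h2
      intro z hz
      rcases List.mem_cons.mp hz with rfl | hz
      · rw [← h1]; exact hall a List.mem_cons_self
      · exact hall z hz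

theorem pvInv_step (a : List String × List String) (b : List String × Nat)
    (w : String) (hw : pvWord w) (hInv : pvInv a b) :
    pvInv (dedupAStep a w) (dedupBStep b w) := by
  obtain ⟨res', prev⟩ := a
  obtain ⟨res, k⟩ := b
  obtain ⟨hb1, hprev, hwords, hrun⟩ := hInv
  simp only at hb1 hprev hwords hrun
  subst hb1
  rcases hrun with ⟨hres, hk⟩ | ⟨x, rest, hxr, hk1, htake, hstop⟩
  · -- empty result
    subst hres hk
    simp only [List.drop_nil, List.length_nil] at hprev
    subst hprev
    have hA : dedupAStep ([], ([] : List String)) w = ([w], [w]) := by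
      simp [dedupAStep, PySem.List.len]
    have hB : dedupBStep (([] : List String), 0) w = ([w], 1) := by
      simp [dedupBStep]
    rw [hA, hB]
    refine ⟨rfl, by simp, by simpa using hw, Or.inr ⟨w, [], by simp, le_refl 1, by simp, by simp⟩⟩
  · -- nonempty result
    have hres : res = rest.reverse ++ [x] := by
      rw [← List.reverse_reverse res, hxr, List.reverse_cons]
    have hxres : x ∈ res := by rw [hres]; simp
    have hn : res.length = rest.length + 1 := by rw [hres]; simp
    have hgetlast : PySem.List.pyGetD res (-1) "" = x := by
      rw [hres]; exact PySem.List.pyGetD_neg_one_append_singleton _ _ _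
    have hne : res ≠ [] := by rw [hres]; simp
    -- prev when the result is long enough
    have hprev5 : 4 ≤ rest.length →
        prev = (rest.take 4).reverse ++ [x] := by
      intro h4
      rw [hprev, hres]
      rw [List.drop_append_of_le_length (by simp)]
      have hidx : rest.length - ((rest.reverse ++ [x]).length - 5) = 4 := by
        simp; omega
      rw [List.drop_reverse, hidx]
    -- if the long-enough window condition holds then prev is constant w
    have hcond5 : ∀ (h5 : 5 ≤ res.length),
        PySem.Str.join " " (PySem.List.slice (prev ++ [w]) (some (-5)) none)
          = PySem.Str.join " " (PySem.List.slice res (some (-5)) none) →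
        ∀ z ∈ prev, z = w := by
      intro h5 hjoin
      have h4 : 4 ≤ rest.length := by omega
      have hplen : prev.length = 5 := by
        rw [hprev]; simp; omega
      rw [PySem.List.slice_from_neg_ofNat _ 5 (by omega)] at hjoin
      rw [PySem.List.slice_from_neg_ofNat _ 5 (by omega)] at hjoin
      have hlen1 : (prev ++ [w]).length = 6 := by simp [hplen]
      rw [hlen1] at hjoin
      rw [← hprev] at hjoin
      have hdrop1 : List.drop (6 - 5) (prev ++ [w]) = prev.drop 1 ++ [w] := by
        rw [List.drop_append_of_le_length (by omega)]
      rw [hdrop1] at hjoin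
      have hsub : ∀ z ∈ prev, z ∈ res := by
        intro z hz; rw [hprev] at hz; exact List.mem_of_mem_drop hz
      have heq : prev.drop 1 ++ [w] = prev := by
        refine str_join_inj _ _ ?_ ?_ ?_ hjoin
        · simp [hplen]
        · intro v hv
          rcases List.mem_append.mp hv with hv | hv
          · exact hwords v (hsub v (List.mem_of_mem_drop hv))
          · rcases List.mem_singleton.mp hv with rfl; exact hw
        · intro v hv
          exact hwords v (hsub v hv)
      obtain ⟨p, prev', hp⟩ : ∃ p prev', prev = p :: prev' := by
        cases prev with
        | nil => simp at hplen
        | cons p prev' => exact ⟨p, prev', rfl⟩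
      rw [hp] at heq ⊢
      simp only [List.drop_one, List.tail_cons] at heq
      exact pv_snoc_eq_cons prev' p w heq
    -- shape of A's step in the append case
    have hAappend : ¬ ((5 : Int) ≤ PySem.List.len res ∧
        PySem.Str.join " " (if (5 : Int) < PySem.List.len (prev ++ [w]) then
            PySem.List.slice (prev ++ [w]) (some (-5)) none else prev ++ [w])
          = PySem.Str.join " " (PySem.List.slice res (some (-5)) none)) →
        dedupAStep (res, prev) w = (res ++ [w],
          if (5 : Int) < PySem.List.len (prev ++ [w]) then
            PySem.List.slice (prev ++ [w]) (some (-5)) none else prev ++ [w]) := by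
      intro hc
      simp only [dedupAStep]
      rw [if_neg hc]
    -- the window carried by A is always the last five appended words
    have hcw : (if (5 : Int) < PySem.List.len (prev ++ [w]) then
          PySem.List.slice (prev ++ [w]) (some (-5)) none else prev ++ [w])
        = (res ++ [w]).drop ((res ++ [w]).length - 5) := by
      by_cases h5 : 5 ≤ res.length
      · have hplen : prev.length = 5 := by
          rw [hprev, List.length_drop]; omega
        rw [if_pos (by simp [hplen])]
        rw [PySem.List.slice_from_neg_ofNat _ 5 (by omega)]
        have hi1 : (prev ++ [w]).length - 5 = 1 := by simp [hplen]
        rw [hi1, List.drop_append_of_le_length (by omega), hprev, List.drop_drop]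
        have hi2 : (res ++ [w]).length - 5 = res.length - 5 + 1 := by simp; omega
        rw [hi2, List.drop_append_of_le_length (by omega)]
      · have h0 : res.length - 5 = 0 := by omega
        have hpr : prev = res := by rw [hprev, h0, List.drop]
        rw [if_neg (by simp [hpr]; omega), hpr]
        have h0' : (res ++ [w]).length - 5 = 0 := by simp; omega
        rw [h0', List.drop]
    by_cases hxw : x = w
    · subst hxw
      by_cases hk5 : 5 ≤ k
      · -- run already capped: both sides skip the word
        have hm : min k 5 = 5 := by omega
        rw [hm] at htake hstop
        have h4 : 4 ≤ rest.length := by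
          have := congrArg List.length htake
          simp at this
          omega
        have h5 : 5 ≤ res.length := by omega
        have hprevrep : prev = List.replicate 4 x ++ [x] := by
          rw [hprev5 h4, htake, List.reverse_replicate]
        have hplen : prev.length = 5 := by rw [hprevrep]; simp
        have hslice_res : PySem.List.slice res (some (-5)) none = prev := by
          rw [PySem.List.slice_from_neg_ofNat _ 5 (by omega), ← hprev]
        have hslice_cw : PySem.List.slice (prev ++ [x]) (some (-5)) none = prev := by
          rw [PySem.List.slice_from_neg_ofNat _ 5 (by omega)]
          have hi1 : (prev ++ [x]).length - 5 = 1 := by simp [hplen]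
          rw [hi1, List.drop_append_of_le_length (by omega), hprevrep]
          rw [show List.drop 1 (List.replicate 4 x ++ [x]) = List.replicate 3 x ++ [x] from rfl,
            show (List.replicate 4 x : List String) = List.replicate 3 x ++ [x] from
              List.replicate_succ']
        have hA : dedupAStep (res, prev) x = (res, prev) := by
          simp only [dedupAStep]
          rw [if_pos (show (5 : Int) < PySem.List.len (prev ++ [x]) by simp [hplen]),
            hslice_cw, hslice_res]
          rw [if_pos (show (5 : Int) ≤ PySem.List.len res ∧
            PySem.Str.join " " prev = PySem.Str.join " " prev from ⟨by simp; omega, rfl⟩)]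
        have hB : dedupBStep (res, k) x = (res, k + 1) := by
          simp only [dedupBStep]
          rw [if_pos (show res ≠ [] ∧ PySem.List.pyGetD res (-1) "" = x from ⟨hne, hgetlast⟩),
            if_neg (show ¬ (k + 1 ≤ 5) by omega)]
        rw [hA, hB]
        have hm' : min (k + 1) 5 = 5 := by omega
        refine ⟨rfl, hprev, hwords, Or.inr ⟨x, rest, hxr, by omega, ?_, ?_⟩⟩
        · rw [hm']; exact htake
        · intro hlt; rw [hm'] at hlt; omega
      · -- run below the cap: both sides append the word
        have hm : min k 5 = k := by omega
        rw [hm] at htake hstop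
        have hcondF : ¬ ((5 : Int) ≤ PySem.List.len res ∧
            PySem.Str.join " " (if (5 : Int) < PySem.List.len (prev ++ [x]) then
                PySem.List.slice (prev ++ [x]) (some (-5)) none else prev ++ [x])
              = PySem.Str.join " " (PySem.List.slice res (some (-5)) none)) := by
          rintro ⟨h5i, hj⟩
          have h5 : 5 ≤ res.length := by simpa using h5i
          have h4 : 4 ≤ rest.length := by omega
          have hplen : prev.length = 5 := by rw [hprev, List.length_drop]; omega
          rw [if_pos (by simp [hplen])] at hj
          have hall := hcond5 h5 hj
          have hk4 : k - 1 < 4 := by omega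
          have hklen : k - 1 < rest.length := by omega
          have hmem : rest[k - 1] ∈ prev := by
            rw [hprev5 h4]
            refine List.mem_append.mpr (Or.inl (List.mem_reverse.mpr ?_))
            have hlt' : k - 1 < (rest.take 4).length := by simp; omega
            have := List.getElem_mem hlt'
            rwa [List.getElem_take] at this
          exact hstop (by omega)
            (by rw [List.getElem?_eq_getElem hklen, hall _ hmem])
        have hA := hAappend hcondF
        have hB : dedupBStep (res, k) x = (res ++ [x], k + 1) := by
          simp only [dedupBStep]
          rw [if_pos (show res ≠ [] ∧ PySem.List.pyGetD res (-1) "" = x from ⟨hne, hgetlast⟩),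
            if_pos (show k + 1 ≤ 5 by omega)]
        rw [hA, hB, hcw]
        have hrev : (res ++ [x]).reverse = x :: x :: rest := by
          simp [hxr]
        have hm' : min (k + 1) 5 = k + 1 := by omega
        refine ⟨rfl, rfl, ?_, Or.inr ⟨x, x :: rest, hrev, by omega, ?_, ?_⟩⟩
        · intro z hz
          rcases List.mem_append.mp hz with hz | hz
          · exact hwords z hz
          · rcases List.mem_singleton.mp hz with rfl; exact hw
        · rw [hm']
          have hk' : k + 1 - 1 = (k - 1) + 1 := by omega
          rw [hk', List.take_succ_cons, htake, ← List.replicate_succ]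
        · intro hlt
          rw [hm'] at hlt ⊢
          have hk' : k + 1 - 1 = (k - 1) + 1 := by omega
          rw [hk', List.getElem?_cons_succ]
          exact hstop (by omega)
    · -- different word: run resets, A appends too
      have hcondF : ¬ ((5 : Int) ≤ PySem.List.len res ∧
          PySem.Str.join " " (if (5 : Int) < PySem.List.len (prev ++ [w]) then
              PySem.List.slice (prev ++ [w]) (some (-5)) none else prev ++ [w])
            = PySem.Str.join " " (PySem.List.slice res (some (-5)) none)) := by
        rintro ⟨h5i, hj⟩
        have h5 : 5 ≤ res.length := by simpa using h5i
        have h4 : 4 ≤ rest.length := by omega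
        have hplen : prev.length = 5 := by rw [hprev, List.length_drop]; omega
        rw [if_pos (by simp [hplen])] at hj
        have hall := hcond5 h5 hj
        have hxmem : x ∈ prev := by rw [hprev5 h4]; simp
        exact hxw (hall x hxmem)
      have hA := hAappend hcondF
      have hB : dedupBStep (res, k) w = (res ++ [w], 1) := by
        simp only [dedupBStep]
        rw [if_neg (show ¬ (res ≠ [] ∧ PySem.List.pyGetD res (-1) "" = w) from
            fun hc => hxw (by rw [← hgetlast]; exact hc.2)),
          if_pos (show (1 : Nat) ≤ 5 by omega)]
      rw [hA, hB, hcw]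
      have hrev : (res ++ [w]).reverse = w :: x :: rest := by
        simp [hxr]
      refine ⟨rfl, rfl, ?_, Or.inr ⟨w, x :: rest, hrev, le_refl 1, by simp, ?_⟩⟩
      · intro z hz
        rcases List.mem_append.mp hz with hz | hz
        · exact hwords z hz
        · rcases List.mem_singleton.mp hz with rfl; exact hw
      · intro _
        simp only [show min 1 5 - 1 = 0 from rfl, List.getElem?_cons_zero]
        intro h
        exact hxw (Option.some.inj h)

theorem pvInv_foldl (ws : List String) (hws : ∀ w ∈ ws, pvWord w)
    (a : List String × List String) (b : List String × Nat) (hInv : pvInv a b) :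
    pvInv (ws.foldl dedupAStep a) (ws.foldl dedupBStep b) := by
  induction ws generalizing a b with
  | nil => exact hInv
  | cons w ws ih =>
      exact ih (fun v hv => hws v (List.mem_cons_of_mem _ hv)) _ _
        (pvInv_step a b w (hws w List.mem_cons_self) hInv)

-- ===== VERDICT (by name: the statement is the Claim_ definition above) =====
theorem deduplicate_text_py_spec : Claim_equal_deduplicate_text_py := by
  intro text _
  have h := pvInv_foldl (PySem.Str.split₀ text) (split₀_words text)
    ([], []) ([], 0) (by simp [pvInv])
  show PySem.Str.join " " ((PySem.Str.split₀ text).foldl dedupAStep ([], [])).1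
      = PySem.Str.join " " ((PySem.Str.split₀ text).foldl dedupBStep ([], 0)).1
  rw [h.1]
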